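-- pv_equiv track=rewrite | github.com/tobackes/pubdedup | code/get_minimal_elements_v2.py | find_min_els
-- ===== SOURCE A (Python) =====
-- def unique_indeces(seq):
--     seen = set()
--     seen_add = seen.add
--     return [i for i in range(len(seq)) if not (seq[i] in seen or seen_add(seq[i]))];
--
-- def find_min_els(repIDs,reps,ids):
--     #- PREPARATION ONLY -------------------------------------
--     indeces      = unique_indeces(repIDs);
--     repIDs       = [repIDs[i] for i in indeces];
--     reps         = [reps[i]   for i in indeces];
--     ids          = [ids[i]    for i in indeces];
--     size2indeces = dict();
--     el2sets      = dict();
--     for i in range(len(repIDs)):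
--         size = len(reps[i]);
--         if size in size2indeces:
--             size2indeces[size].add(i);
--         else:
--             size2indeces[size] = set([i]);
--             el2sets[size]      = dict();
--         for el in reps[i]:
--             if el in el2sets[size]:
--                 el2sets[size][el].add(i);
--             else:
--                 el2sets[size][el] = set([i]);
--     #--------------------------------------------------------
--     #- THE ACTUAL SEARCH ------------------------------------
--     min_els = set(range(len(repIDs)));
--     for size in sorted(size2indeces.keys()):
--         for i in size2indeces[size]:
--             if not licenced(reps[i],repIDs[i]): continue;
--             specifications = set([]);
--             for size_ in [size__ for size__ in el2sets if size__ > size]: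
--                 els             = [el for el in reps[i] if el in el2sets[size_]];
--                 specifications |= set([]) if len(els) != len(reps[i]) else set.intersection(*[el2sets[size_][el] for el in els]);
--             min_els       -= specifications;
--     min_els = sorted(list(min_els));
--     #--------------------------------------------------------
--     return [repIDs[i] for i in min_els], [reps[i] for i in min_els], [ids[i] for i in min_els];
--
-- def licenced(rep,repID): #TODO: This is very expensive in the long run!
--     types = set([el[0] for el in rep]);
--     if 'title' in types and 'surname' in types:
--         return True;
--     #for el in rep:
--     #    if el[0]=='title':# and el[1] != None:
--     #        return True;
--     return False;
-- ===== SOURCE B (Python) =====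
-- def licenced(rep, repID):
--     types = {el[0] for el in rep}
--     return 'title' in types and 'surname' in types
--
-- def find_min_els(repIDs, reps, ids):
--     # keep first occurrence of each repID
--     seen = set()
--     keep_idx = []
--     for i in range(len(repIDs)):
--         if repIDs[i] not in seen:
--             seen.add(repIDs[i])
--             keep_idx.append(i)
--     repIDs = [repIDs[i] for i in keep_idx]
--     reps = [reps[i] for i in keep_idx]
--     ids = [ids[i] for i in keep_idx]
--     n = len(repIDs)
--     # direct pairwise strict-superset elimination, no inverted index
--     sets = [set(reps[i]) for i in range(n)]
--     keep = [True] * n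
--     for i in range(n):
--         if not licenced(reps[i], repIDs[i]):
--             continue
--         for j in range(n):
--             if keep[j] and len(reps[i]) < len(reps[j]) and sets[i] <= sets[j]:
--                 keep[j] = False
--     out = [j for j in range(n) if keep[j]]
--     return [repIDs[j] for j in out], [reps[j] for j in out], [ids[j] for j in out]
-- ===== Notes on version B (the rewrite author's own statement) =====
-- stated objective: simpler
-- what changed: Replaces the size-bucketed inverted index (size->element->posting sets) and posting-list intersections with direct pairwise strict-superset tests over the deduplicated reps, keeping a boolean keep-array instead of accumulating removal sets.
import Mathlib
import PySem

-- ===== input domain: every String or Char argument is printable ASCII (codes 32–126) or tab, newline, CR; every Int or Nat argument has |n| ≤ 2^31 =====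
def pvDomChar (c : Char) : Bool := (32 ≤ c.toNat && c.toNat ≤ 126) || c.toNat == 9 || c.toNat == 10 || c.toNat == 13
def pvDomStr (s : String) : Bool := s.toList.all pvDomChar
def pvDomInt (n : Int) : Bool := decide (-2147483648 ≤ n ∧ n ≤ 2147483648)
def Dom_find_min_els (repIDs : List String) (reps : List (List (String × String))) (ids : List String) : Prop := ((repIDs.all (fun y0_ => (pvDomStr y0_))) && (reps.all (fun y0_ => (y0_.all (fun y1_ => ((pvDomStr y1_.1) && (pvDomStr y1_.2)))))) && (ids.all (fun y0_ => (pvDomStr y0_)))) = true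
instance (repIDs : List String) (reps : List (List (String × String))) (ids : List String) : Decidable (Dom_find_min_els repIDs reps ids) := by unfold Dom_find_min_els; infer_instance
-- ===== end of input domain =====

-- B replaces A's size-bucketed inverted index and posting-list intersections by direct
-- pairwise strict-superset tests with a boolean keep-array (objective: simpler; same asymptotic cost).


-- ===== PORT A =====
-- module helper 'licenced', used (with identical code) by both A and B
def licenced (rep : List (String × String)) (_repID : String) : Bool :=
  let types : PySem.Set String := PySem.Set.ofList (rep.map (fun el => el.1))
  PySem.Set.contains types "title" && PySem.Set.contains types "surname"

def unique_indeces (seq : List String) : List Nat :=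
  ((List.range seq.length).foldl
    (fun (st : PySem.Set String × List Nat) i =>
      if PySem.Set.contains st.1 (seq.getD i "") then st
      else (PySem.Set.add st.1 (seq.getD i ""), st.2 ++ [i]))
    (PySem.Set.empty, [])).2

-- A's 'PREPARATION' loop: size2indeces and el2sets built over i in range(n)
def buildIndex (reps2 : List (List (String × String))) (n : Nat) :
    PySem.Dict Nat (PySem.Set Nat) × PySem.Dict Nat (PySem.Dict (String × String) (PySem.Set Nat)) :=
  (List.range n).foldl
    (fun st i =>
      let size := (reps2.getD i []).length
      let st2 :=
        if st.1.contains size then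
          (st.1.insert size (PySem.Set.add (st.1.getD size PySem.Set.empty) i), st.2)
        else
          (st.1.insert size (PySem.Set.ofList [i]), st.2.insert size PySem.Dict.empty)
      let inner := (reps2.getD i []).foldl
        (fun (d : PySem.Dict (String × String) (PySem.Set Nat)) el =>
          if d.contains el then d.insert el (PySem.Set.add (d.getD el PySem.Set.empty) i)
          else d.insert el (PySem.Set.ofList [i]))
        (st2.2.getD size PySem.Dict.empty)
      (st2.1, st2.2.insert size inner))
    (PySem.Dict.empty, PySem.Dict.empty)

-- A's 'THE ACTUAL SEARCH' loops, producing min_els before the final sort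
def searchMinEls (repIDs2 : List String) (reps2 : List (List (String × String))) (n : Nat)
    (size2indeces : PySem.Dict Nat (PySem.Set Nat))
    (el2sets : PySem.Dict Nat (PySem.Dict (String × String) (PySem.Set Nat))) : PySem.Set Nat :=
  (PySem.List.sorted size2indeces.keys (fun x => x) false).foldl
    (fun (m : PySem.Set Nat) size =>
      (size2indeces.getD size PySem.Set.empty).foldl
        (fun (m : PySem.Set Nat) i =>
          if !(licenced (reps2.getD i []) (repIDs2.getD i "")) then m
          else
            let specifications : PySem.Set Nat :=
              ((el2sets.keys).filter (fun size_ => size < size_)).foldl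
                (fun (sp : PySem.Set Nat) size_ =>
                  let d_ := el2sets.getD size_ PySem.Dict.empty
                  let els := (reps2.getD i []).filter (fun el => d_.contains el)
                  let inc : PySem.Set Nat :=
                    if els.length ≠ (reps2.getD i []).length then PySem.Set.empty
                    else
                      -- 'set.intersection(*[ … ])': first posting set intersected with the rest.
                      -- The [] case is Python's nullary-intersection TypeError, unreachable here
                      -- because 'licenced' guarantees a nonempty rep.
                      match els with
                      | [] => PySem.Set.empty
                      | e :: rest => rest.foldl (fun (acc : PySem.Set Nat) el => PySem.Set.inter acc (d_.getD el PySem.Set.empty)) (d_.getD e PySem.Set.empty)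
                  PySem.Set.union sp inc)
                PySem.Set.empty
            PySem.Set.diff m specifications)
        m)
    (PySem.Set.ofList (List.range n))

def find_min_els (repIDs : List String) (reps : List (List (String × String))) (ids : List String) : List String × (List (List (String × String))) × List String :=
  let indeces := unique_indeces repIDs
  let repIDs2 := indeces.map (fun i => repIDs.getD i "")
  let reps2 := indeces.map (fun i => reps.getD i [])
  let ids2 := indeces.map (fun i => ids.getD i "")
  let built := buildIndex reps2 repIDs2.length
  let min_els := PySem.List.sorted (searchMinEls repIDs2 reps2 repIDs2.length built.1 built.2) (fun x => x) false
  (min_els.map (fun i => repIDs2.getD i ""),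
   min_els.map (fun i => reps2.getD i []),
   min_els.map (fun i => ids2.getD i ""))

-- ===== PORT B =====
-- B's elimination loop: boolean keep-array over pairwise strict-superset tests
def keepArray (repIDs2 : List String) (reps2 : List (List (String × String))) (n : Nat) : List Bool :=
  let sets := (List.range n).map (fun i => PySem.Set.ofList (reps2.getD i []))
  (List.range n).foldl
    (fun (keep : List Bool) i =>
      if !(licenced (reps2.getD i []) (repIDs2.getD i "")) then keep
      else (List.range n).foldl
        (fun (keep : List Bool) j =>
          if keep.getD j true && (decide ((reps2.getD i []).length < (reps2.getD j []).length)
              && PySem.Set.issubset (sets.getD i PySem.Set.empty) (sets.getD j PySem.Set.empty))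
          then keep.set j false else keep)
        keep)
    (List.replicate n true)

def find_min_els_alt (repIDs : List String) (reps : List (List (String × String))) (ids : List String) : List String × (List (List (String × String))) × List String :=
  let keep_idx := ((List.range repIDs.length).foldl
    (fun (st : PySem.Set String × List Nat) i =>
      if PySem.Set.contains st.1 (repIDs.getD i "") then st
      else (PySem.Set.add st.1 (repIDs.getD i ""), st.2 ++ [i]))
    (PySem.Set.empty, [])).2
  let repIDs2 := keep_idx.map (fun i => repIDs.getD i "")
  let reps2 := keep_idx.map (fun i => reps.getD i [])
  let ids2 := keep_idx.map (fun i => ids.getD i "")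
  let n := repIDs2.length
  let keep := keepArray repIDs2 reps2 n
  let out := (List.range n).filter (fun j => keep.getD j true)
  (out.map (fun i => repIDs2.getD i ""),
   out.map (fun i => reps2.getD i []),
   out.map (fun i => ids2.getD i ""))

-- ===== PRECONDITION & SPEC =====
-- Pre_ excludes exactly the ragged inputs on which Python A raises IndexError: a position i that is
-- the FIRST occurrence of repIDs[i] but is out of range for reps or ids.
def Pre_find_min_els (repIDs : List String) (reps : List (List (String × String))) (ids : List String) : Prop :=
  ∀ i, i < repIDs.length → repIDs.getD i "" ∉ repIDs.take i → (i < reps.length ∧ i < ids.length)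
instance (repIDs : List String) (reps : List (List (String × String))) (ids : List String) : Decidable (Pre_find_min_els repIDs reps ids) := by unfold Pre_find_min_els; infer_instance

def pvWitness_find_min_els : List String × (List (List (String × String))) × List String :=
  (["a", "b"], [[("title", "t"), ("surname", "s")], [("title", "t"), ("surname", "s"), ("year", "1")]], ["i1", "i2"])

def Spec_find_min_els (repIDs : List String) (reps : List (List (String × String))) (ids : List String) (out : List String × (List (List (String × String))) × List String) : Prop := out = find_min_els_alt repIDs reps ids
instance (repIDs : List String) (reps : List (List (String × String))) (ids : List String) (out : List String × (List (List (String × String))) × List String) : Decidable (Spec_find_min_els repIDs reps ids out) := by unfold Spec_find_min_els; infer_instance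

-- ===== CLAIM (what is proved, stated in full; the proofs are below) =====
def Claim_equal_find_min_els : Prop := ∀ (repIDs : List String) (reps : List (List (String × String))) (ids : List String), Dom_find_min_els repIDs reps ids → Pre_find_min_els repIDs reps ids → Spec_find_min_els repIDs reps ids (find_min_els repIDs reps ids)

-- ===== LEMMAS AND PROOFS =====

theorem mem_foldl_union {α β : Type} [BEq α] [LawfulBEq α] (l : List β) (f : β → PySem.Set α)
    (sp : PySem.Set α) (j : α) :
    j ∈ l.foldl (fun sp x => PySem.Set.union sp (f x)) sp ↔ j ∈ sp ∨ ∃ x ∈ l, j ∈ f x := by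
  induction l generalizing sp with
  | nil => simp
  | cons x t ih => simp [List.foldl_cons, ih, PySem.Set.mem_union, or_assoc]

theorem mem_foldl_inter {α β : Type} [BEq α] [LawfulBEq α] (l : List β) (g : β → PySem.Set α)
    (acc : PySem.Set α) (j : α) :
    j ∈ l.foldl (fun acc el => PySem.Set.inter acc (g el)) acc ↔ j ∈ acc ∧ ∀ el ∈ l, j ∈ g el := by
  induction l generalizing acc with
  | nil => simp
  | cons x t ih =>
    simp only [List.foldl_cons, ih, PySem.Set.mem_inter, List.mem_cons]
    constructor
    · rintro ⟨⟨h1, h2⟩, h3⟩; exact ⟨h1, fun el hel => by rcases hel with rfl | hel; exact h2; exact h3 el hel⟩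
    · rintro ⟨h1, h2⟩; exact ⟨⟨h1, h2 x (Or.inl rfl)⟩, fun el hel => h2 el (Or.inr hel)⟩

theorem foldl_filter_shape {α β : Type} (l : List β) (step : List α → β → List α)
    (q : β → α → Bool) (h : ∀ m x, step m x = m.filter (q x)) (m : List α) :
    l.foldl step m = m.filter (fun j => l.all (fun x => q x j)) := by
  induction l generalizing m with
  | nil => simp
  | cons x t ih =>
    simp only [List.foldl_cons, ih, h, List.filter_filter, List.all_cons]
    congr 1
    funext j
    rw [Bool.and_comm]

theorem bool_eq (a b : Bool) (h : a = true ↔ b = true) : a = b := by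
  cases a <;> cases b <;> simp_all

theorem bool_eq_not (a b : Bool) (h : a = true ↔ ¬ b = true) : a = !b := by
  cases a <;> cases b <;> simp_all

def pvInner (i : Nat) (L : List (String × String)) (d : PySem.Dict (String × String) (PySem.Set Nat)) :
    PySem.Dict (String × String) (PySem.Set Nat) :=
  L.foldl
    (fun (d : PySem.Dict (String × String) (PySem.Set Nat)) el =>
      if d.contains el then d.insert el (PySem.Set.add (d.getD el PySem.Set.empty) i)
      else d.insert el (PySem.Set.ofList [i])) d

def pvInnerU (i : Nat) (L : List (String × String)) (d : PySem.Dict (String × String) (PySem.Set Nat)) :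
    PySem.Dict (String × String) (PySem.Set Nat) :=
  L.foldl (fun d el => d.insert el (PySem.Set.add (d.getD el PySem.Set.empty) i)) d

theorem pvInner_eq_U (i : Nat) (L : List (String × String)) (d : PySem.Dict (String × String) (PySem.Set Nat)) :
    pvInner i L d = pvInnerU i L d := by
  apply PySem.List.foldl_congr_mem
  intro d el _
  by_cases h : d.contains el = true
  · simp [h]
  · have hg : d.getD el PySem.Set.empty = PySem.Set.empty :=
      PySem.Dict.getD_of_not_contains d PySem.Set.empty (by simpa using h)
    rw [if_neg h, hg]
    rfl

theorem pvInnerU_contains (i : Nat) (L : List (String × String))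
    (d : PySem.Dict (String × String) (PySem.Set Nat)) (el : String × String) :
    (pvInnerU i L d).contains el = true ↔ d.contains el = true ∨ el ∈ L := by
  rw [PySem.Dict.contains_iff_mem_keys, PySem.Dict.contains_iff_mem_keys]
  unfold pvInnerU
  rw [PySem.Dict.keys_foldl_insert]
  exact PySem.Set.mem_update _ _ _

theorem pvInnerU_getD (i : Nat) (L : List (String × String))
    (d : PySem.Dict (String × String) (PySem.Set Nat)) (el : String × String) (j : Nat) :
    j ∈ (pvInnerU i L d).getD el PySem.Set.empty ↔
      j ∈ d.getD el PySem.Set.empty ∨ (j = i ∧ el ∈ L) := by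
  induction L generalizing d with
  | nil => simp [pvInnerU]
  | cons e t ih =>
    show j ∈ (pvInnerU i t _).getD el PySem.Set.empty ↔ _
    rw [ih]
    rw [PySem.Dict.getD_insert]
    by_cases he : el = e
    · subst he
      simp [PySem.Set.mem_add]
      tauto
    · simp [he]

theorem buildIndex_succ (P : List (List (String × String))) (n : Nat) :
    buildIndex P (n + 1) =
      (let st := buildIndex P n
       let size := (P.getD n []).length
       let st2 :=
         if st.1.contains size then
           (st.1.insert size (PySem.Set.add (st.1.getD size PySem.Set.empty) n), st.2)
         else
           (st.1.insert size (PySem.Set.ofList [n]), st.2.insert size PySem.Dict.empty)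
       (st2.1, st2.2.insert size (pvInner n (P.getD n []) (st2.2.getD size PySem.Dict.empty)))) := by
  unfold buildIndex
  rw [List.range_succ, List.foldl_append]
  rfl

theorem buildIndex_succ_pos (P : List (List (String × String))) (n : Nat)
    (hc : (buildIndex P n).1.contains ((P.getD n []).length) = true) :
    buildIndex P (n + 1) =
      ((buildIndex P n).1.insert ((P.getD n []).length)
         (PySem.Set.add ((buildIndex P n).1.getD ((P.getD n []).length) PySem.Set.empty) n),
       (buildIndex P n).2.insert ((P.getD n []).length)
         (pvInner n (P.getD n []) ((buildIndex P n).2.getD ((P.getD n []).length) PySem.Dict.empty))) := by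
  rw [buildIndex_succ]
  simp only [if_pos hc]

theorem buildIndex_succ_neg (P : List (List (String × String))) (n : Nat)
    (hc : ¬ (buildIndex P n).1.contains ((P.getD n []).length) = true) :
    buildIndex P (n + 1) =
      ((buildIndex P n).1.insert ((P.getD n []).length) (PySem.Set.ofList [n]),
       (buildIndex P n).2.insert ((P.getD n []).length)
         (pvInner n (P.getD n []) PySem.Dict.empty)) := by
  rw [buildIndex_succ]
  simp only [if_neg hc]
  show ((buildIndex P n).1.insert _ _,
      ((buildIndex P n).2.insert _ PySem.Dict.empty).insert _
        (pvInner n (P.getD n [])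
          (((buildIndex P n).2.insert ((P.getD n []).length) PySem.Dict.empty).getD ((P.getD n []).length) PySem.Dict.empty))) = _
  rw [PySem.Dict.getD_insert_self, PySem.Dict.insert_insert_self]

theorem buildIndex_inv (P : List (List (String × String))) (n : Nat) :
    (∀ s j, j ∈ (buildIndex P n).1.getD s PySem.Set.empty ↔ j < n ∧ (P.getD j []).length = s)
  ∧ (∀ s, (buildIndex P n).1.contains s = true ↔ ∃ i, i < n ∧ (P.getD i []).length = s)
  ∧ (∀ s, (buildIndex P n).2.contains s = (buildIndex P n).1.contains s)
  ∧ (∀ s el j, j ∈ ((buildIndex P n).2.getD s PySem.Dict.empty).getD el PySem.Set.empty ↔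
      j < n ∧ (P.getD j []).length = s ∧ el ∈ P.getD j [])
  ∧ (∀ s el, ((buildIndex P n).2.getD s PySem.Dict.empty).contains el = true ↔
      ∃ j, j < n ∧ (P.getD j []).length = s ∧ el ∈ P.getD j []) := by
  induction n with
  | zero =>
    refine ⟨?_, ?_, ?_, ?_, ?_⟩ <;>
      simp [buildIndex, PySem.Dict.getD_empty, PySem.Dict.contains_empty]
  | succ n ih =>
    obtain ⟨I1, I2, I3, I4, I5⟩ := ih
    have hsucc : ∀ j, j < n + 1 ↔ j < n ∨ j = n := by omega
    by_cases hc : (buildIndex P n).1.contains ((P.getD n []).length) = true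
    · rw [buildIndex_succ_pos P n hc]
      refine ⟨?_, ?_, ?_, ?_, ?_⟩
      · intro s j
        show j ∈ ((buildIndex P n).1.insert _ _).getD s PySem.Set.empty ↔ _
        rw [PySem.Dict.getD_insert]
        by_cases hs : s = (P.getD n []).length
        · subst hs
          rw [if_pos rfl, PySem.Set.mem_add, I1]
          constructor
          · rintro (⟨h1, h2⟩ | rfl)
            · exact ⟨by omega, h2⟩
            · exact ⟨by omega, rfl⟩
          · rintro ⟨h1, h2⟩
            rcases (hsucc j).mp h1 with h | rfl
            · exact Or.inl ⟨h, h2⟩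
            · exact Or.inr rfl
        · rw [if_neg hs, I1]
          constructor
          · rintro ⟨h1, h2⟩; exact ⟨by omega, h2⟩
          · rintro ⟨h1, h2⟩
            rcases (hsucc j).mp h1 with h | rfl
            · exact ⟨h, h2⟩
            · exact absurd h2.symm (by simpa using hs)
      · intro s
        show ((buildIndex P n).1.insert _ _).contains s = true ↔ _
        rw [PySem.Dict.contains_insert]
        simp only [Bool.or_eq_true, beq_iff_eq, I2]
        constructor
        · rintro (rfl | ⟨i, hi, he⟩)
          · exact ⟨n, by omega, rfl⟩
          · exact ⟨i, by omega, he⟩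
        · rintro ⟨i, hi, he⟩
          rcases (hsucc i).mp hi with h | rfl
          · exact Or.inr ⟨i, h, he⟩
          · exact Or.inl he.symm
      · intro s
        show ((buildIndex P n).2.insert _ _).contains s = ((buildIndex P n).1.insert _ _).contains s
        rw [PySem.Dict.contains_insert, PySem.Dict.contains_insert, I3]
      · intro s el j
        show j ∈ (((buildIndex P n).2.insert _ _).getD s PySem.Dict.empty).getD el PySem.Set.empty ↔ _
        rw [PySem.Dict.getD_insert]
        by_cases hs : s = (P.getD n []).length
        · subst hs
          rw [if_pos rfl, pvInner_eq_U, pvInnerU_getD, I4]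
          constructor
          · rintro (⟨h1, h2, h3⟩ | ⟨rfl, h3⟩)
            · exact ⟨by omega, h2, h3⟩
            · exact ⟨by omega, rfl, h3⟩
          · rintro ⟨h1, h2, h3⟩
            rcases (hsucc j).mp h1 with h | rfl
            · exact Or.inl ⟨h, h2, h3⟩
            · exact Or.inr ⟨rfl, h3⟩
        · rw [if_neg hs, I4]
          constructor
          · rintro ⟨h1, h2, h3⟩; exact ⟨by omega, h2, h3⟩
          · rintro ⟨h1, h2, h3⟩
            rcases (hsucc j).mp h1 with h | rfl
            · exact ⟨h, h2, h3⟩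
            · exact absurd h2.symm (by simpa using hs)
      · intro s el
        show (((buildIndex P n).2.insert _ _).getD s PySem.Dict.empty).contains el = true ↔ _
        rw [PySem.Dict.getD_insert]
        by_cases hs : s = (P.getD n []).length
        · subst hs
          rw [if_pos rfl, pvInner_eq_U, pvInnerU_contains, I5]
          constructor
          · rintro (⟨jj, h1, h2, h3⟩ | h3)
            · exact ⟨jj, by omega, h2, h3⟩
            · exact ⟨n, by omega, rfl, h3⟩
          · rintro ⟨jj, h1, h2, h3⟩
            rcases (hsucc jj).mp h1 with h | rfl
            · exact Or.inl ⟨jj, h, h2, h3⟩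
            · exact Or.inr h3
        · rw [if_neg hs, I5]
          constructor
          · rintro ⟨jj, h1, h2, h3⟩; exact ⟨jj, by omega, h2, h3⟩
          · rintro ⟨jj, h1, h2, h3⟩
            rcases (hsucc jj).mp h1 with h | rfl
            · exact ⟨jj, h, h2, h3⟩
            · exact absurd h2.symm (by simpa using hs)
    · have hc' : (buildIndex P n).1.contains ((P.getD n []).length) = false := by
        simpa using hc
      have hnone : ¬ ∃ i, i < n ∧ (P.getD i []).length = (P.getD n []).length :=
        fun h => hc ((I2 _).mpr h)
      have hSgetD : (buildIndex P n).1.getD ((P.getD n []).length) PySem.Set.empty = PySem.Set.empty :=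
        PySem.Dict.getD_of_not_contains _ _ hc'
      have hEc : (buildIndex P n).2.contains ((P.getD n []).length) = false := by
        rw [I3]; exact hc'
      have hEgetD : (buildIndex P n).2.getD ((P.getD n []).length) PySem.Dict.empty = PySem.Dict.empty :=
        PySem.Dict.getD_of_not_contains _ _ hEc
      rw [buildIndex_succ_neg P n hc]
      refine ⟨?_, ?_, ?_, ?_, ?_⟩
      · intro s j
        show j ∈ ((buildIndex P n).1.insert _ _).getD s PySem.Set.empty ↔ _
        rw [PySem.Dict.getD_insert]
        by_cases hs : s = (P.getD n []).length
        · subst hs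
          rw [if_pos rfl, PySem.Set.mem_ofList]
          simp only [List.mem_singleton]
          constructor
          · rintro rfl; exact ⟨by omega, rfl⟩
          · rintro ⟨h1, h2⟩
            rcases (hsucc j).mp h1 with h | rfl
            · exact absurd ⟨j, h, h2⟩ hnone
            · rfl
        · rw [if_neg hs, I1]
          constructor
          · rintro ⟨h1, h2⟩; exact ⟨by omega, h2⟩
          · rintro ⟨h1, h2⟩
            rcases (hsucc j).mp h1 with h | rfl
            · exact ⟨h, h2⟩
            · exact absurd h2.symm (by simpa using hs)
      · intro s
        show ((buildIndex P n).1.insert _ _).contains s = true ↔ _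
        rw [PySem.Dict.contains_insert]
        simp only [Bool.or_eq_true, beq_iff_eq, I2]
        constructor
        · rintro (rfl | ⟨i, hi, he⟩)
          · exact ⟨n, by omega, rfl⟩
          · exact ⟨i, by omega, he⟩
        · rintro ⟨i, hi, he⟩
          rcases (hsucc i).mp hi with h | rfl
          · exact Or.inr ⟨i, h, he⟩
          · exact Or.inl he.symm
      · intro s
        show ((buildIndex P n).2.insert _ _).contains s = ((buildIndex P n).1.insert _ _).contains s
        rw [PySem.Dict.contains_insert, PySem.Dict.contains_insert, I3]
      · intro s el j
        show j ∈ (((buildIndex P n).2.insert _ _).getD s PySem.Dict.empty).getD el PySem.Set.empty ↔ _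
        rw [PySem.Dict.getD_insert]
        by_cases hs : s = (P.getD n []).length
        · subst hs
          rw [if_pos rfl, pvInner_eq_U, pvInnerU_getD]
          simp only [PySem.Dict.getD_empty, PySem.Set.empty, List.not_mem_nil, false_or]
          constructor
          · rintro ⟨rfl, h3⟩; exact ⟨by omega, rfl, h3⟩
          · rintro ⟨h1, h2, h3⟩
            rcases (hsucc j).mp h1 with h | rfl
            · exact absurd ⟨j, h, h2⟩ hnone
            · exact ⟨rfl, h3⟩
        · rw [if_neg hs, I4]
          constructor
          · rintro ⟨h1, h2, h3⟩; exact ⟨by omega, h2, h3⟩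
          · rintro ⟨h1, h2, h3⟩
            rcases (hsucc j).mp h1 with h | rfl
            · exact ⟨h, h2, h3⟩
            · exact absurd h2.symm (by simpa using hs)
      · intro s el
        show (((buildIndex P n).2.insert _ _).getD s PySem.Dict.empty).contains el = true ↔ _
        rw [PySem.Dict.getD_insert]
        by_cases hs : s = (P.getD n []).length
        · subst hs
          rw [if_pos rfl, pvInner_eq_U, pvInnerU_contains]
          simp only [PySem.Dict.contains_empty, Bool.false_eq_true, false_or]
          constructor
          · intro h3; exact ⟨n, by omega, rfl, h3⟩
          · rintro ⟨jj, h1, h2, h3⟩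
            rcases (hsucc jj).mp h1 with h | rfl
            · exact absurd ⟨jj, h, h2⟩ hnone
            · exact h3
        · rw [if_neg hs, I5]
          constructor
          · rintro ⟨jj, h1, h2, h3⟩; exact ⟨jj, by omega, h2, h3⟩
          · rintro ⟨jj, h1, h2, h3⟩
            rcases (hsucc jj).mp h1 with h | rfl
            · exact ⟨jj, h, h2, h3⟩
            · exact absurd h2.symm (by simpa using hs)

def pvLic (R : List String) (P : List (List (String × String))) (i : Nat) : Bool :=
  licenced (P.getD i []) (R.getD i "")

def pvRem (R : List String) (P : List (List (String × String))) (n j : Nat) : Bool :=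
  (List.range n).any (fun i => pvLic R P i
    && decide ((P.getD i []).length < (P.getD j []).length)
    && (P.getD i []).all (fun el => decide (el ∈ P.getD j [])))

theorem pvRem_iff (R : List String) (P : List (List (String × String))) (n j : Nat) :
    pvRem R P n j = true ↔ ∃ i, i < n ∧ pvLic R P i = true ∧
      (P.getD i []).length < (P.getD j []).length ∧ ∀ el ∈ P.getD i [], el ∈ P.getD j [] := by
  simp [pvRem, List.any_eq_true, List.mem_range, and_assoc]

theorem licenced_ne_nil (rep : List (String × String)) (rid : String)
    (h : licenced rep rid = true) : rep ≠ [] := by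
  rintro rfl
  simp [licenced] at h

def pvInc (P : List (List (String × String))) (n : Nat) (size_ i : Nat) : PySem.Set Nat :=
  let d_ := (buildIndex P n).2.getD size_ PySem.Dict.empty
  let els := (P.getD i []).filter (fun el => d_.contains el)
  if els.length ≠ (P.getD i []).length then PySem.Set.empty
  else
    match els with
    | [] => PySem.Set.empty
    | e :: rest => rest.foldl (fun (acc : PySem.Set Nat) el => PySem.Set.inter acc (d_.getD el PySem.Set.empty)) (d_.getD e PySem.Set.empty)

theorem mem_pvInc (P : List (List (String × String))) (n size_ i j : Nat)
    (hne : P.getD i [] ≠ []) :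
    j ∈ pvInc P n size_ i ↔
      j < n ∧ (P.getD j []).length = size_ ∧ ∀ el ∈ P.getD i [], el ∈ P.getD j [] := by
  obtain ⟨I1, I2, I3, I4, I5⟩ := buildIndex_inv P n
  unfold pvInc
  simp only []
  by_cases hall : ∀ el ∈ P.getD i [], ((buildIndex P n).2.getD size_ PySem.Dict.empty).contains el = true
  · have hfil : (P.getD i []).filter (fun el => ((buildIndex P n).2.getD size_ PySem.Dict.empty).contains el) = P.getD i [] :=
      List.filter_eq_self.mpr hall
    rw [hfil, if_neg (by simp)]
    rcases hPel : P.getD i [] with _ | ⟨e, rest⟩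
    · exact absurd hPel hne
    · rw [mem_foldl_inter]
      constructor
      · rintro ⟨h1, h2⟩
        have h1' := (I4 _ _ _).mp h1
        refine ⟨h1'.1, h1'.2.1, ?_⟩
        intro el hel
        rcases List.mem_cons.mp hel with rfl | hel
        · exact h1'.2.2
        · exact ((I4 _ _ _).mp (h2 el hel)).2.2
      · rintro ⟨h1, h2, h3⟩
        refine ⟨(I4 _ _ _).mpr ⟨h1, h2, h3 e List.mem_cons_self⟩, ?_⟩
        intro el hel
        exact (I4 _ _ _).mpr ⟨h1, h2, h3 el (List.mem_cons_of_mem _ hel)⟩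
  · push Not at hall
    obtain ⟨el0, hel0, hnc⟩ := hall
    have hlt : ((P.getD i []).filter (fun el => ((buildIndex P n).2.getD size_ PySem.Dict.empty).contains el)).length ≠ (P.getD i []).length := by
      intro heq
      have := List.Sublist.eq_of_length List.filter_sublist heq
      rw [List.filter_eq_self] at this
      exact hnc (this el0 hel0)
    rw [if_pos hlt]
    simp only [PySem.Set.empty, List.not_mem_nil, false_iff]
    rintro ⟨h1, h2, h3⟩
    exact hnc ((I5 _ _).mpr ⟨j, h1, h2, h3 el0 hel0⟩)

def pvSpecs (P : List (List (String × String))) (n size i : Nat) : PySem.Set Nat :=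
  (((buildIndex P n).2.keys).filter (fun size_ => size < size_)).foldl
    (fun sp size_ => PySem.Set.union sp (pvInc P n size_ i)) PySem.Set.empty

theorem mem_pvSpecs (P : List (List (String × String))) (n i j : Nat)
    (hne : P.getD i [] ≠ []) :
    j ∈ pvSpecs P n ((P.getD i []).length) i ↔
      j < n ∧ (P.getD i []).length < (P.getD j []).length ∧ ∀ el ∈ P.getD i [], el ∈ P.getD j [] := by
  obtain ⟨I1, I2, I3, I4, I5⟩ := buildIndex_inv P n
  unfold pvSpecs
  rw [mem_foldl_union]
  simp only [PySem.Set.empty, List.not_mem_nil, false_or, List.mem_filter, decide_eq_true_eq]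
  constructor
  · rintro ⟨size_, ⟨hk, hlt⟩, hj⟩
    rw [mem_pvInc P n size_ i j hne] at hj
    exact ⟨hj.1, hj.2.1 ▸ hlt, hj.2.2⟩
  · rintro ⟨h1, h2, h3⟩
    refine ⟨(P.getD j []).length, ⟨?_, h2⟩, ?_⟩
    · rw [← PySem.Dict.contains_iff_mem_keys, I3, I2]
      exact ⟨j, h1, rfl⟩
    · exact (mem_pvInc P n _ i j hne).mpr ⟨h1, rfl, h3⟩

theorem searchMinEls_eq (R : List String) (P : List (List (String × String))) (n : Nat) :
    searchMinEls R P n (buildIndex P n).1 (buildIndex P n).2 =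
      (List.range n).filter (fun j => !pvRem R P n j) := by
  obtain ⟨I1, I2, I3, I4, I5⟩ := buildIndex_inv P n
  unfold searchMinEls
  have hinner : ∀ (size : Nat) (m : PySem.Set Nat),
      ((buildIndex P n).1.getD size PySem.Set.empty).foldl
        (fun (m : PySem.Set Nat) i =>
          if !(licenced (P.getD i []) (R.getD i "")) then m
          else PySem.Set.diff m (pvSpecs P n size i)) m
      = m.filter (fun j => ((buildIndex P n).1.getD size PySem.Set.empty).all
          (fun i => !(licenced (P.getD i []) (R.getD i "")) || !((pvSpecs P n size i).contains j))) := by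
    intro size m
    refine foldl_filter_shape _ _ _ ?_ _
    intro m' i
    by_cases hl : licenced (P.getD i []) (R.getD i "") = true
    · rw [hl, if_neg (by simp)]
      show List.filter _ m' = _
      exact List.filter_congr (fun x _ => by simp)
    · have hl' : licenced (P.getD i []) (R.getD i "") = false := by simpa using hl
      rw [hl']
      show m' = _
      conv_rhs => rw [show (fun j => !false || !((pvSpecs P n size i).contains j)) = (fun _ : Nat => true) from rfl]
      rw [List.filter_true]
  refine Eq.trans (foldl_filter_shape _ _
      (fun size j => ((buildIndex P n).1.getD size PySem.Set.empty).all
        (fun i => !(licenced (P.getD i []) (R.getD i "")) || !((pvSpecs P n size i).contains j)))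
      (fun m size => hinner size m) _) ?_
  rw [show PySem.Set.ofList (List.range n) = List.range n from
    PySem.Set.ofList_eq_self_of_nodup (List.range n) List.nodup_range]
  refine List.filter_congr ?_
  intro j hj
  rw [List.mem_range] at hj
  have hiff : (PySem.List.sorted (buildIndex P n).1.keys (fun x => x) false).all
      (fun size => ((buildIndex P n).1.getD size PySem.Set.empty).all
        (fun i => !(licenced (P.getD i []) (R.getD i "")) || !((pvSpecs P n size i).contains j))) = true
      ↔ ¬ (pvRem R P n j = true) := by
    rw [List.all_eq_true, pvRem_iff]
    constructor
    · intro hall hrem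
      obtain ⟨i, hi, hlic, hlen, hsub⟩ := hrem
      have hkey : (P.getD i []).length ∈ (buildIndex P n).1.keys := by
        rw [← PySem.Dict.contains_iff_mem_keys, I2]; exact ⟨i, hi, rfl⟩
      have hks : (P.getD i []).length ∈ PySem.List.sorted (buildIndex P n).1.keys (fun x => x) false :=
        (PySem.List.sorted_perm _ _ _).mem_iff.mpr hkey
      have hcls : i ∈ (buildIndex P n).1.getD ((P.getD i []).length) PySem.Set.empty :=
        (I1 _ _).mpr ⟨hi, rfl⟩
      have h2 := hall _ hks
      rw [List.all_eq_true] at h2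
      have hlic' : licenced (P.getD i []) (R.getD i "") = true := hlic
      have hq := h2 i hcls
      rw [hlic'] at hq
      simp only [Bool.not_true, Bool.false_or, Bool.not_eq_true'] at hq
      have hmem : j ∈ pvSpecs P n ((P.getD i []).length) i :=
        (mem_pvSpecs P n i j (licenced_ne_nil _ _ hlic')).mpr ⟨hj, hlen, hsub⟩
      rw [← PySem.Set.contains_iff] at hmem
      rw [hq] at hmem
      cases hmem
    · intro hnone size hks
      rw [List.all_eq_true]
      intro i hcls
      by_cases hl : licenced (P.getD i []) (R.getD i "") = true
      · rw [hl]
        simp only [Bool.not_true, Bool.false_or, Bool.not_eq_true']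
        obtain ⟨hi, hsz⟩ := (I1 _ _).mp hcls
        by_cases hc : (pvSpecs P n size i).contains j = true
        · exfalso
          rw [PySem.Set.contains_iff] at hc
          rw [← hsz] at hc
          obtain ⟨_, hlen, hsub⟩ := (mem_pvSpecs P n i j (licenced_ne_nil _ _ hl)).mp hc
          exact hnone ⟨i, hi, hl, hlen, hsub⟩
        · simpa using hc
      · have hl' : licenced (P.getD i []) (R.getD i "") = false := by simpa using hl
        rw [hl']
        rfl
  exact bool_eq_not _ _ hiff

def pvCond (P : List (List (String × String))) (n i j : Nat) : Bool :=
  decide ((P.getD i []).length < (P.getD j []).length)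
    && PySem.Set.issubset
      (((List.range n).map (fun i => PySem.Set.ofList (P.getD i []))).getD i PySem.Set.empty)
      (((List.range n).map (fun i => PySem.Set.ofList (P.getD i []))).getD j PySem.Set.empty)

theorem innerB_length (c : Nat → Bool) (l : List Nat) (keep : List Bool) :
    (l.foldl (fun keep j' => if keep.getD j' true && c j' then keep.set j' false else keep) keep).length
      = keep.length := by
  induction l generalizing keep with
  | nil => rfl
  | cons x t ih =>
    rw [List.foldl_cons, ih]
    by_cases h : (keep.getD x true && c x) = true
    · rw [if_pos h, List.length_set]
    · rw [if_neg h]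

theorem innerB_getD (c : Nat → Bool) (l : List Nat) (keep : List Bool)
    (hl : ∀ x ∈ l, x < keep.length) (j : Nat) :
    (l.foldl (fun keep j' => if keep.getD j' true && c j' then keep.set j' false else keep) keep).getD j true
      = (keep.getD j true && !(decide (j ∈ l) && c j)) := by
  induction l generalizing keep with
  | nil => simp
  | cons x t ih =>
    rw [List.foldl_cons]
    have hx : x < keep.length := hl x List.mem_cons_self
    have hstep : ∀ keep' : List Bool, keep'.length = keep.length →
        (∀ y ∈ t, y < keep'.length) := by
      intro keep' he y hy
      rw [he]; exact hl y (List.mem_cons_of_mem _ hy)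
    by_cases h : (keep.getD x true && c x) = true
    · rw [if_pos h, ih _ (hstep _ (by rw [List.length_set]))]
      obtain ⟨hg, hc⟩ := Bool.and_eq_true_iff.mp h
      by_cases hj : j = x
      · subst hj
        have hset : (keep.set j false).getD j true = false := by
          rw [List.getD_eq_getElem?_getD, List.getElem?_set_self (by exact hx)]
          rfl
        rw [hset, hg, hc]
        simp [List.mem_cons]
      · have hset : (keep.set x false).getD j true = keep.getD j true := by
          rw [List.getD_eq_getElem?_getD, List.getElem?_set_ne (by omega), ← List.getD_eq_getElem?_getD]
        rw [hset]
        have hmem : decide (j ∈ x :: t) = decide (j ∈ t) := by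
          simp [List.mem_cons, hj]
        rw [hmem]
    · rw [if_neg h, ih _ (hstep _ rfl)]
      by_cases hj : j = x
      · subst hj
        cases hkg : keep.getD j true
        · simp
        · have hc : c j = false := by
            cases hcc : c j
            · rfl
            · exact absurd (by rw [hkg, hcc]; rfl) h
          rw [hc]
          simp
      · have hmem : decide (j ∈ x :: t) = decide (j ∈ t) := by
          simp [List.mem_cons, hj]
        rw [hmem]

theorem outerB_getD (R : List String) (P : List (List (String × String))) (n : Nat)
    (l : List Nat) (keep : List Bool) (hk : keep.length = n) (j : Nat) (hj : j < n) :
    (l.foldl (fun (keep : List Bool) i =>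
        if !(licenced (P.getD i []) (R.getD i "")) then keep
        else (List.range n).foldl (fun (keep : List Bool) j =>
          if keep.getD j true && pvCond P n i j then keep.set j false else keep) keep) keep).getD j true
      = (keep.getD j true && !(l.any (fun i => licenced (P.getD i []) (R.getD i "") && pvCond P n i j))) := by
  induction l generalizing keep with
  | nil => simp
  | cons x t ih =>
    rw [List.foldl_cons]
    by_cases h : licenced (P.getD x []) (R.getD x "") = true
    · rw [h, if_neg (by simp)]
      rw [ih _ (by rw [innerB_length]; exact hk)]
      rw [innerB_getD _ _ _ (fun y hy => by rw [hk]; exact List.mem_range.mp hy) j]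
      rw [List.any_cons, h]
      simp only [List.mem_range, hj, decide_true, Bool.true_and]
      cases hkg : keep.getD j true <;> cases hc : pvCond P n x j <;> simp
    · have h' : licenced (P.getD x []) (R.getD x "") = false := by simpa using h
      rw [h', if_pos (show (!false) = true by rfl), ih _ hk, List.any_cons, h']
      simp

theorem keepArray_getD (R : List String) (P : List (List (String × String))) (n j : Nat)
    (hj : j < n) :
    (keepArray R P n).getD j true = !pvRem R P n j := by
  show ((List.range n).foldl (fun (keep : List Bool) i =>
      if !(licenced (P.getD i []) (R.getD i "")) then keep
      else (List.range n).foldl (fun (keep : List Bool) j =>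
        if keep.getD j true && pvCond P n i j then keep.set j false else keep) keep)
      (List.replicate n true)).getD j true = _
  rw [outerB_getD R P n _ _ (List.length_replicate ..) j hj]
  have hrepl : (List.replicate n true).getD j true = true := by
    rw [List.getD_eq_getElem?_getD, List.getElem?_replicate]
    simp [hj]
  rw [hrepl, Bool.true_and, pvRem]
  congr 1
  refine PySem.List.any_congr_mem ?_
  intro i hi
  rw [List.mem_range] at hi
  apply bool_eq
  unfold pvLic pvCond
  rw [PySem.List.getD_map_range _ _ _ _ hi, PySem.List.getD_map_range _ _ _ _ hj]
  simp only [Bool.and_eq_true, and_assoc, List.all_eq_true, PySem.Set.issubset_iff,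
    PySem.Set.mem_ofList, decide_eq_true_eq]

theorem core_eq (R : List String) (P : List (List (String × String))) (n : Nat) :
    PySem.List.sorted (searchMinEls R P n (buildIndex P n).1 (buildIndex P n).2) (fun x => x) false
      = (List.range n).filter (fun j => (keepArray R P n).getD j true) := by
  rw [searchMinEls_eq]
  rw [PySem.List.sorted_eq_of_perm_of_pairwise_lt _ _ _ (List.Perm.refl _)
    (List.Pairwise.sublist List.filter_sublist List.pairwise_lt_range)]
  refine List.filter_congr ?_
  intro j hj
  rw [keepArray_getD R P n j (List.mem_range.mp hj)]

-- ===== VERDICT (by name: the statement is the Claim_ definition above) =====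
theorem find_min_els_spec : Claim_equal_find_min_els := by
  intro repIDs reps ids _ _
  unfold Spec_find_min_els
  unfold find_min_els find_min_els_alt unique_indeces
  simp only []
  rw [core_eq]
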